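-- pv_equiv track=rewrite | github.com/Thinker-Mars/Demo | picture-ocr/python-solu/ocr.py | get_bin_table
-- ===== SOURCE A (Python) =====
-- def get_bin_table(threshold):
--     """
--     按照阈值进行二值化处理
--     :param threshold:
--     :return:
--     """
--     table = []
--     rate = 0.1
--     for i in range(256):
--         if threshold * (1 - rate) <= i <= threshold * (1 + rate):
--             table.append(1)
--         else:
--             table.append(0)
--     return table
-- ===== SOURCE B (Python) =====
-- def get_bin_table(threshold):
--     rate = 0.1
--     lo = threshold * (1 - rate)
--     hi = threshold * (1 + rate)
--     start = max(0, -int(-lo // 1))   # ceil(lo) clamped to 0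
--     end = min(255, int(hi // 1))     # floor(hi) clamped to 255
--     table = [0] * 256
--     if start <= end:
--         table[start:end + 1] = [1] * (end - start + 1)
--     return table
-- ===== Notes on version B (the rewrite author's own statement) =====
-- stated objective: alternative
-- what changed: Replaces A's per-element threshold test over the whole table with a direct computation of the window's integer boundaries (ceil/floor of the same float bounds, clamped to the table's index range) followed by a bulk slice fill of a zero table.
import Mathlib
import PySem

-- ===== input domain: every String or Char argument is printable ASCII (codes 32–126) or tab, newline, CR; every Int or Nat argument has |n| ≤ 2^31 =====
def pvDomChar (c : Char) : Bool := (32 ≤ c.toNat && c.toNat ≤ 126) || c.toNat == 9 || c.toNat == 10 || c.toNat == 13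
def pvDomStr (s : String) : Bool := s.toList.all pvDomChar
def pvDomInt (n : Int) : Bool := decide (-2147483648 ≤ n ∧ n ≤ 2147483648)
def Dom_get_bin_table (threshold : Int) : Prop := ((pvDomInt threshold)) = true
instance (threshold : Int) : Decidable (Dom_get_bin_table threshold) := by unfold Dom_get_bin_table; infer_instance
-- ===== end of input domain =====

-- B replaces A's per-element threshold test over the table by computing the integer
-- start/end of the 1-window directly (ceil/floor of the same float bounds) and bulk-filling
-- a slice of a zero table (objective: different decomposition, same result).

-- Shared float semantics: Python's `threshold * (1 - 0.1)` / `threshold * (1 + 0.1)` are IEEE-754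
-- doubles; `1 - 0.1` is exactly the double 8106479329266893/2^53 and `1 + 0.1` exactly
-- 4953959590107546/2^52, so the product is the rational n/2^k rounded to nearest-even double.
-- pvRnd n k returns that double's exact value as a pair (p, j) meaning p/2^j; it is exact for
-- |n| < 2^105 (here |n| ≤ 2^31 · 2^53), so both ports' float arithmetic is exact on Dom.
def pvRnd (n : Int) (k : Nat) : Int × Nat :=
  let a := n.natAbs
  if a < 2 ^ 53 then (n, k)
  else
    let s := a.log2 - 52
    let q := a / 2 ^ s
    let r := a % 2 ^ s
    let h := 2 ^ (s - 1)
    let q' := if h < r ∨ (r = h ∧ q % 2 = 1) then q + 1 else q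
    (if n < 0 then -(q' : Int) else (q' : Int), k - s)

-- ===== PORT A =====
-- literal loop: for i in range(256): append 1 if lo <= i <= hi else 0, where the float
-- comparison `p/2^j ≤ i` is exactly `p ≤ i * 2^j` (i is an exact small integer).
def get_bin_table (threshold : Int) : List Int :=
  (PySem.List.pyRange 0 256 1).foldl
    (fun table i =>
      let lo := pvRnd (threshold * 8106479329266893) 53
      let hi := pvRnd (threshold * 4953959590107546) 52
      if lo.1 ≤ i * 2 ^ lo.2 ∧ i * 2 ^ hi.2 ≤ hi.1 then table ++ [1] else table ++ [0])
    []

-- ===== PORT B =====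
-- Source B: start = max(0, ceil(lo)); end = min(255, floor(hi)); table = [0]*256;
-- table[start:end+1] = [1]*(end-start+1).  ceil(lo) = -((-lo)//1) and floor(hi) = hi//1 are
-- exact on these magnitudes; the slice assignment (0 ≤ start ≤ end+1 ≤ 256) is take/fill/drop.
def get_bin_table_alt (threshold : Int) : List Int :=
  let lo := pvRnd (threshold * 8106479329266893) 53
  let hi := pvRnd (threshold * 4953959590107546) 52
  let start := max 0 (-(PySem.Int.floordiv (-lo.1) (2 ^ lo.2)))
  let stop := min 255 (PySem.Int.floordiv hi.1 (2 ^ hi.2))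
  let table := List.replicate 256 (0 : Int)
  if start ≤ stop then
    table.take start.toNat ++ List.replicate (stop - start + 1).toNat 1 ++ table.drop (stop + 1).toNat
  else table

-- ===== PRECONDITION & SPEC =====
def Spec_get_bin_table (threshold : Int) (out : List Int) : Prop := out = get_bin_table_alt threshold
instance (threshold : Int) (out : List Int) : Decidable (Spec_get_bin_table threshold out) := by unfold Spec_get_bin_table; infer_instance

-- ===== CLAIM (what is proved, stated in full; the proofs are below) =====
def Claim_equal_get_bin_table : Prop := ∀ (threshold : Int), Dom_get_bin_table threshold → Spec_get_bin_table threshold (get_bin_table threshold)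

-- ===== LEMMAS AND PROOFS =====

-- ceiling bracket: -((-p) // 2^j) ≤ i ↔ p ≤ i·2^j
theorem pv_ceil_le_iff (p : Int) (j : Nat) (i : Int) :
    (-(PySem.Int.floordiv (-p) (2 ^ j)) ≤ i) ↔ p ≤ i * 2 ^ j := by
  have hb : (0 : Int) < 2 ^ j := by positivity
  rw [neg_le, PySem.Int.le_floordiv_iff_mul_le hb]
  constructor
  · intro h; nlinarith
  · intro h; nlinarith

-- floor bracket: i ≤ q // 2^k ↔ i·2^k ≤ q
theorem pv_le_floor_iff (q : Int) (k : Nat) (i : Int) :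
    (i ≤ PySem.Int.floordiv q (2 ^ k)) ↔ i * 2 ^ k ≤ q := by
  have hb : (0 : Int) < 2 ^ k := by positivity
  exact PySem.Int.le_floordiv_iff_mul_le hb

-- the generic equality, for arbitrary rounded bounds (p/2^j, q/2^k)
set_option maxRecDepth 8192 in
theorem pv_main (p : Int) (j : Nat) (q : Int) (k : Nat) :
    (PySem.List.pyRange 0 256 1).foldl
      (fun table i => if p ≤ i * 2 ^ j ∧ i * 2 ^ k ≤ q then table ++ [1] else table ++ [0]) []
    = (let start := max 0 (-(PySem.Int.floordiv (-p) (2 ^ j)))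
       let stop := min 255 (PySem.Int.floordiv q (2 ^ k))
       let table := List.replicate 256 (0 : Int)
       if start ≤ stop then
         table.take start.toNat ++ List.replicate (stop - start + 1).toNat 1 ++ table.drop (stop + 1).toNat
       else table) := by
  have h1 : (fun (table : List Int) (i : Int) =>
      if p ≤ i * 2 ^ j ∧ i * 2 ^ k ≤ q then table ++ [1] else table ++ [0]) =
      fun table i => table ++ [if p ≤ i * 2 ^ j ∧ i * 2 ^ k ≤ q then (1 : Int) else 0] := by
    funext a b; by_cases h : p ≤ b * 2 ^ j ∧ b * 2 ^ k ≤ q <;> simp [h]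
  rw [h1, PySem.List.foldl_append_singleton_eq_map, List.nil_append]
  set st := max 0 (-(PySem.Int.floordiv (-p) (2 ^ j))) with hst
  set sp := min 255 (PySem.Int.floordiv q (2 ^ k)) with hsp
  have hcond : ∀ i : Int, 0 ≤ i → i ≤ 255 →
      ((p ≤ i * 2 ^ j ∧ i * 2 ^ k ≤ q) ↔ (st ≤ i ∧ i ≤ sp)) := by
    intro i h0 h255
    rw [hst, hsp, max_le_iff, le_min_iff, pv_ceil_le_iff, pv_le_floor_iff]
    tauto
  have hst0 : (0 : Int) ≤ st := le_max_left _ _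
  have hsp255 : sp ≤ 255 := min_le_left _ _
  by_cases hse : st ≤ sp
  · rw [if_pos hse]
    apply List.ext_getElem
    · simp [PySem.List.length_pyRange_one]; omega
    · intro n hn1 hn2
      have hn256 : n < 256 := by
        simpa [PySem.List.length_pyRange_one] using hn1
      rw [List.getElem_map, PySem.List.getElem_pyRange_one]
      have h0n : (0 : Int) ≤ (n : Int) := by positivity
      have h255 : (n : Int) ≤ 255 := by omega
      rw [zero_add, if_congr (hcond n h0n h255) rfl rfl]
      by_cases hA : n < st.toNat
      · rw [List.getElem_append_left (by
          simp only [List.length_append, List.length_take, List.length_replicate]; omega)]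
        rw [List.getElem_append_left (by
          simp only [List.length_take, List.length_replicate]; omega)]
        rw [List.getElem_take, List.getElem_replicate, if_neg (by omega)]
      · by_cases hB : n < st.toNat + (sp - st + 1).toNat
        · rw [List.getElem_append_left (by
            simp only [List.length_append, List.length_take, List.length_replicate]; omega)]
          rw [List.getElem_append_right (by
            simp only [List.length_take, List.length_replicate]; omega)]
          rw [List.getElem_replicate, if_pos (by omega)]
        · rw [List.getElem_append_right (by
            simp only [List.length_append, List.length_take, List.length_replicate]; omega)]
          rw [List.getElem_drop, List.getElem_replicate, if_neg (by omega)]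
  · rw [if_neg hse]
    apply List.eq_replicate_iff.mpr
    refine ⟨by simp [PySem.List.length_pyRange_one], ?_⟩
    intro x hx
    obtain ⟨i, hi, rfl⟩ := List.mem_map.mp hx
    have hmem := (PySem.List.mem_pyRange_one).mp hi
    rw [if_neg]
    intro hc
    have := (hcond i hmem.1 (by omega)).mp hc
    omega

-- ===== VERDICT (by name: the statement is the Claim_ definition above) =====
theorem get_bin_table_spec : Claim_equal_get_bin_table := by
  intro t _
  show get_bin_table t = get_bin_table_alt t
  unfold get_bin_table get_bin_table_alt
  exact pv_main _ _ _ _
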